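-- pv_equiv track=rewrite | github.com/vcg-uvic/simple-python-scheduler | sps/salloc_common.py | convert_to_user_usage
-- ===== SOURCE A (Python) =====
-- def convert_to_user_usage(gpu_usage):
--     """TODO: writeme"""
--
--     alloc = {}
--     for gpu in gpu_usage:
--         if len(gpu_usage[gpu]) > 0:
--             for cur_gpu in gpu_usage[gpu]:
--                 if cur_gpu not in alloc:
--                     alloc[cur_gpu] = [gpu]
--                 else:
--                     alloc[cur_gpu] += [gpu]
--     # Get user-based usage number
--     usage = {}
--     for user in alloc:
--         usage[user] = len(set(alloc[user]))
--
--     return usage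
-- ===== SOURCE B (Python) =====
-- def convert_to_user_usage(gpu_usage):
--     """One pass: count, per user, the GPUs on which the user appears (deduped per GPU)."""
--     usage = {}
--     for users in gpu_usage.values():
--         seen = set()
--         for user in users:
--             if user not in seen:
--                 seen.add(user)
--                 usage[user] = usage.get(user, 0) + 1
--     return usage
-- ===== Notes on version B (the rewrite author's own statement) =====
-- stated objective: simpler
-- what changed: B drops A's intermediate reverse map (user -> list of gpus) and its second dedup-and-measure pass: it makes a single pass over gpu_usage, deduplicating users within each GPU's list on the fly and incrementing a per-user counter once per GPU, never materializing per-user GPU lists.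
import Mathlib
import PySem

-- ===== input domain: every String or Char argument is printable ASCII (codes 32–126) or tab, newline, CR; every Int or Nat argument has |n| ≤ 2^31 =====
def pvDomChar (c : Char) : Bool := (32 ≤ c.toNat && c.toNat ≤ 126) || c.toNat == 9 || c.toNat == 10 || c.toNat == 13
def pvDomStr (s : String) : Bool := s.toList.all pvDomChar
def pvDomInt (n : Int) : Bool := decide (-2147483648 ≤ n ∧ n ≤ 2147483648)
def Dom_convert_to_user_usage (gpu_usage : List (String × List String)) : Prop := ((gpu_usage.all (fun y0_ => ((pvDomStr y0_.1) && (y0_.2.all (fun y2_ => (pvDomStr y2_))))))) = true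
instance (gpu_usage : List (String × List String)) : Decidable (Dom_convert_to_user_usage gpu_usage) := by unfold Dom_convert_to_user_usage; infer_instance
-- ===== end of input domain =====

-- B counts distinct GPUs per user in one pass (dedup within each GPU's list), instead of
-- A's two phases (reverse user->gpus map, then set-size of each list): objective = simpler.

-- ===== PORT A =====
-- A-side helper: the body of A's inner loop ('for cur_gpu in gpu_usage[gpu]: …')
def pvAllocStep (gpu : String) (alloc : PySem.Dict String (List String)) (cur_gpu : String) : PySem.Dict String (List String) :=
  if alloc.contains cur_gpu = false then alloc.insert cur_gpu [gpu]
  else alloc.modify cur_gpu [] (fun l => l ++ [gpu])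

def convert_to_user_usage (gpu_usage : List (String × List String)) : List (String × Int) :=
  let alloc : PySem.Dict String (List String) :=
    gpu_usage.foldl (fun alloc p =>
      if 0 < p.2.length then p.2.foldl (pvAllocStep p.1) alloc else alloc)
      PySem.Dict.empty
  let usage : PySem.Dict String Int :=
    alloc.items.foldl (fun usage p => usage.insert p.1 ((PySem.Set.ofList p.2).length : Int))
      PySem.Dict.empty
  usage.items

-- ===== PORT B =====
-- B-side helper: the body of B's inner loop over one GPU's user list (state: seen set × usage dict)
def pvCountStep (su : PySem.Set String × PySem.Dict String Int) (user : String) : PySem.Set String × PySem.Dict String Int :=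
  if PySem.Set.contains su.1 user = false then
    (PySem.Set.add su.1 user, su.2.insert user (su.2.getD user 0 + 1))
  else su

def convert_to_user_usage_alt (gpu_usage : List (String × List String)) : List (String × Int) :=
  (gpu_usage.foldl (fun usage p =>
      (p.2.foldl pvCountStep ((PySem.Set.empty : PySem.Set String), usage)).2)
    (PySem.Dict.empty : PySem.Dict String Int)).items

-- ===== PRECONDITION & SPEC =====
-- The argument is a Python dict, whose association-list encoding always has pairwise
-- distinct keys; Pre_ states exactly that (assoc lists with duplicate gpu keys
-- represent no Python input, so nothing A returns on is excluded).
def Pre_convert_to_user_usage (gpu_usage : List (String × List String)) : Prop :=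
  (gpu_usage.map Prod.fst).Nodup
instance (gpu_usage : List (String × List String)) : Decidable (Pre_convert_to_user_usage gpu_usage) := by unfold Pre_convert_to_user_usage; infer_instance

def pvWitness_convert_to_user_usage : (List (String × List String)) :=
  [("gpu0", ["alice", "bob", "alice"]), ("gpu1", ["alice"]), ("gpu2", [])]

def Spec_convert_to_user_usage (gpu_usage : List (String × List String)) (out : List (String × Int)) : Prop := out = convert_to_user_usage_alt gpu_usage
instance (gpu_usage : List (String × List String)) (out : List (String × Int)) : Decidable (Spec_convert_to_user_usage gpu_usage out) := by unfold Spec_convert_to_user_usage; infer_instance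

-- ===== CLAIM (what is proved, stated in full; the proofs are below) =====
def Claim_equal_convert_to_user_usage : Prop := ∀ (gpu_usage : List (String × List String)), Dom_convert_to_user_usage gpu_usage → Pre_convert_to_user_usage gpu_usage → Spec_convert_to_user_usage gpu_usage (convert_to_user_usage gpu_usage)

-- ===== LEMMAS AND PROOFS =====

-- value of one (user ↦ gpu-list) entry of A's reverse map, as A's second pass measures it
def pvF : String × List String → String × Int :=
  fun p => (p.1, ((PySem.Set.ofList p.2).length : Int))

-- an association list with Nodup keys determines each entry by its key
theorem pv_key_uniq {ν : Type} {l : List (String × ν)} (h : (l.map Prod.fst).Nodup)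
    {p q : String × ν} (hp : p ∈ l) (hq : q ∈ l) (he : p.1 = q.1) : p = q := by
  induction l with
  | nil => cases hp
  | cons a t ih =>
    simp only [List.map_cons, List.nodup_cons] at h
    rcases List.mem_cons.1 hp with rfl | hp' <;> rcases List.mem_cons.1 hq with rfl | hq'
    · rfl
    · exact absurd (he ▸ List.mem_map_of_mem hq') h.1
    · exact absurd (he ▸ List.mem_map_of_mem hp') h.1
    · exact ih h.2 hp' hq'

-- looking a user up in B's usage dict is looking it up in A's alloc and measuring
theorem pv_get?_map (d : PySem.Dict String (List String)) (usage : PySem.Dict String Int)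
    (h : usage.items = d.items.map pvF) (u : String) :
    usage.get? u = (d.get? u).map (fun gs => ((PySem.Set.ofList gs).length : Int)) := by
  simp only [PySem.Dict.get?, h, List.find?_map]
  have hc : ((fun p : String × Int => p.1 == u) ∘ pvF) = (fun p : String × List String => p.1 == u) := rfl
  rw [hc]
  cases d.items.find? (fun p => p.1 == u) <;> rfl

-- usage and alloc have the same keys, so the same 'contains'
theorem pv_contains_eq (d : PySem.Dict String (List String)) (usage : PySem.Dict String Int)
    (h : usage.items = d.items.map pvF) (u : String) :
    usage.contains u = d.contains u := by
  simp only [PySem.Dict.contains, h, List.any_map]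
  rfl

-- Inner loops: processing one GPU g's user list keeps B's usage equal (as items) to
-- pvF mapped over A's alloc, keeps alloc's keys Nodup, keeps 'seen' = {u | g ∈ alloc[u]},
-- and only ever adds g to alloc's value lists.
theorem pv_inner (g : String) (us : List String) :
    ∀ (alloc : PySem.Dict String (List String)) (seen : PySem.Set String)
      (usage : PySem.Dict String Int),
      alloc.keys.Nodup →
      usage.items = alloc.items.map pvF →
      (∀ u : String, u ∈ seen ↔ ∃ gs, alloc.get? u = some gs ∧ g ∈ gs) →
      (us.foldl (pvAllocStep g) alloc).keys.Nodup ∧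
      (us.foldl pvCountStep (seen, usage)).2.items = (us.foldl (pvAllocStep g) alloc).items.map pvF ∧
      (∀ u : String, u ∈ (us.foldl pvCountStep (seen, usage)).1 ↔
        ∃ gs, (us.foldl (pvAllocStep g) alloc).get? u = some gs ∧ g ∈ gs) ∧
      (∀ p' ∈ (us.foldl (pvAllocStep g) alloc).items, ∀ x ∈ p'.2,
        (∃ p ∈ alloc.items, x ∈ p.2) ∨ x = g) := by
  induction us with
  | nil =>
    intro alloc seen usage h1 h2 h3
    exact ⟨h1, h2, h3, fun p' hp' x hx => Or.inl ⟨p', hp', hx⟩⟩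
  | cons u rest ih =>
    intro alloc seen usage h1 h2 h3
    simp only [List.foldl_cons]
    by_cases hs : u ∈ seen
    · -- u already seen in this GPU: B skips, A appends g to alloc[u] (g already there)
      obtain ⟨gs, hget, hg⟩ := (h3 u).1 hs
      have hmem : (u, gs) ∈ alloc.items :=
        (PySem.Dict.get?_eq_some_iff_mem_items alloc u gs h1).1 hget
      have hcon : alloc.contains u = true := by
        rw [PySem.Dict.contains_eq_isSome_get?, hget]; rfl
      have hA : pvAllocStep g alloc u = alloc.insert u (gs ++ [g]) := by
        simp [pvAllocStep, hcon, PySem.Dict.modify, PySem.Dict.getD, hget]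
      have hB : pvCountStep (seen, usage) u = (seen, usage) := by
        have hc : PySem.Set.contains seen u = true := (PySem.Set.contains_iff seen u).2 hs
        unfold pvCountStep
        rw [hc]
        simp
      rw [hA, hB]
      have hIk : (alloc.insert u (gs ++ [g])).keys.Nodup :=
        PySem.Dict.nodup_keys_insert alloc u (gs ++ [g]) h1
      have hIe : usage.items = (alloc.insert u (gs ++ [g])).items.map pvF := by
        rw [PySem.Dict.items_insert_of_contains alloc (gs ++ [g]) hcon, h2, List.map_map]
        apply List.map_congr_left
        intro p hp
        by_cases hpu : p.1 = u
        · have hpeq : p = (u, gs) := pv_key_uniq h1 hp hmem hpu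
          subst hpeq
          simp only [Function.comp, beq_self_eq_true, if_pos]
          have : PySem.Set.ofList (gs ++ [g]) = PySem.Set.ofList gs := by
            rw [PySem.Set.ofList_append_singleton,
              PySem.Set.add_of_mem ((PySem.Set.mem_ofList gs g).2 hg)]
          simp [pvF, this]
        · simp [Function.comp, pvF, hpu]
      have hIs : ∀ u' : String, u' ∈ seen ↔
          ∃ gs', (alloc.insert u (gs ++ [g])).get? u' = some gs' ∧ g ∈ gs' := by
        intro u'
        rw [PySem.Dict.get?_insert]
        by_cases hu' : u' = u
        · subst hu'
          rw [if_pos rfl]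
          constructor
          · intro _; exact ⟨gs ++ [g], rfl, by simp⟩
          · intro _; exact hs
        · rw [if_neg hu']; exact h3 u'
      obtain ⟨n1, n2, n3, n4⟩ := ih (alloc.insert u (gs ++ [g])) seen usage hIk hIe hIs
      refine ⟨n1, n2, n3, ?_⟩
      intro p' hp' x hx
      rcases n4 p' hp' x hx with ⟨p, hpmem, hxp⟩ | hxg
      · rcases (PySem.Dict.mem_items_insert alloc u (gs ++ [g]) p).1 hpmem with rfl | ⟨hpold, _⟩
        · rcases List.mem_append.1 hxp with hxgs | hxg2
          · exact Or.inl ⟨(u, gs), hmem, hxgs⟩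
          · exact Or.inr (List.mem_singleton.1 hxg2)
        · exact Or.inl ⟨p, hpold, hxp⟩
      · exact Or.inr hxg
    · have hsb : PySem.Set.contains seen u = false := by
        cases h' : PySem.Set.contains seen u
        · rfl
        · exact absurd ((PySem.Set.contains_iff seen u).1 h') hs
      have hB : pvCountStep (seen, usage) u =
          (PySem.Set.add seen u, usage.insert u (usage.getD u 0 + 1)) := by
        unfold pvCountStep
        rw [hsb]
        simp
      by_cases hcon : alloc.contains u = true
      · -- u counted on an earlier GPU but not yet on this one
        obtain ⟨gs, hget⟩ : ∃ gs, alloc.get? u = some gs := by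
          have := PySem.Dict.contains_eq_isSome_get? (d := alloc) (k := u)
          rw [hcon] at this
          exact Option.isSome_iff_exists.1 this.symm
        have hmem : (u, gs) ∈ alloc.items :=
          (PySem.Dict.get?_eq_some_iff_mem_items alloc u gs h1).1 hget
        have hgns : g ∉ gs := fun hgin => hs ((h3 u).2 ⟨gs, hget, hgin⟩)
        have hA : pvAllocStep g alloc u = alloc.insert u (gs ++ [g]) := by
          simp [pvAllocStep, hcon, PySem.Dict.modify, PySem.Dict.getD, hget]
        have hval : pvF (u, gs ++ [g]) = (u, ((PySem.Set.ofList gs).length : Int) + 1) := by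
          have : PySem.Set.ofList (gs ++ [g]) = PySem.Set.ofList gs ++ [g] := by
            rw [PySem.Set.ofList_append_singleton,
              PySem.Set.add_of_not_mem (fun hgin => hgns ((PySem.Set.mem_ofList gs g).1 hgin))]
          simp [pvF, this]
        have hgetD : usage.getD u 0 = ((PySem.Set.ofList gs).length : Int) := by
          rw [PySem.Dict.getD_eq_get?_getD, pv_get?_map alloc usage h2 u, hget]; rfl
        have hconU : usage.contains u = true := by rw [pv_contains_eq alloc usage h2 u]; exact hcon
        have hIk : (alloc.insert u (gs ++ [g])).keys.Nodup :=
          PySem.Dict.nodup_keys_insert alloc u (gs ++ [g]) h1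
        have hIe : (usage.insert u (usage.getD u 0 + 1)).items =
            (alloc.insert u (gs ++ [g])).items.map pvF := by
          rw [PySem.Dict.items_insert_of_contains usage (usage.getD u 0 + 1) hconU,
            PySem.Dict.items_insert_of_contains alloc (gs ++ [g]) hcon,
            h2, List.map_map, List.map_map]
          apply List.map_congr_left
          intro p hp
          by_cases hpu : p.1 = u
          · have hpeq : p = (u, gs) := pv_key_uniq h1 hp hmem hpu
            subst hpeq
            have hofl : PySem.Set.ofList (gs ++ [g]) = PySem.Set.ofList gs ++ [g] := by
              rw [PySem.Set.ofList_append_singleton,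
                PySem.Set.add_of_not_mem (fun hgin => hgns ((PySem.Set.mem_ofList gs g).1 hgin))]
            simp [Function.comp, pvF, hgetD, hofl]
          · simp [Function.comp, pvF, hpu]
        have hIs : ∀ u' : String, u' ∈ PySem.Set.add seen u ↔
            ∃ gs', (alloc.insert u (gs ++ [g])).get? u' = some gs' ∧ g ∈ gs' := by
          intro u'
          rw [PySem.Set.mem_add, PySem.Dict.get?_insert]
          by_cases hu' : u' = u
          · subst hu'
            rw [if_pos rfl]
            constructor
            · intro _; exact ⟨gs ++ [g], rfl, by simp⟩
            · intro _; simp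
          · rw [if_neg hu']
            constructor
            · intro h'
              rcases h' with h' | h'
              · exact (h3 u').1 h'
              · exact absurd h' hu'
            · intro h'; exact Or.inl ((h3 u').2 h')
        rw [hA, hB]
        obtain ⟨n1, n2, n3, n4⟩ :=
          ih (alloc.insert u (gs ++ [g])) (PySem.Set.add seen u)
            (usage.insert u (usage.getD u 0 + 1)) hIk hIe hIs
        refine ⟨n1, n2, n3, ?_⟩
        intro p' hp' x hx
        rcases n4 p' hp' x hx with ⟨p, hpmem, hxp⟩ | hxg
        · rcases (PySem.Dict.mem_items_insert alloc u (gs ++ [g]) p).1 hpmem with rfl | ⟨hpold, _⟩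
          · rcases List.mem_append.1 hxp with hxgs | hxg2
            · exact Or.inl ⟨(u, gs), hmem, hxgs⟩
            · exact Or.inr (List.mem_singleton.1 hxg2)
          · exact Or.inl ⟨p, hpold, hxp⟩
        · exact Or.inr hxg
      · -- a brand-new user
        have hconF : alloc.contains u = false := by
          cases h' : alloc.contains u
          · rfl
          · exact absurd h' hcon
        have hA : pvAllocStep g alloc u = alloc.insert u [g] := by
          simp [pvAllocStep, hconF]
        have hconU : usage.contains u = false := by
          rw [pv_contains_eq alloc usage h2 u]; exact hconF
        have hgetA : alloc.get? u = none := by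
          cases h' : alloc.get? u
          · rfl
          · simp [PySem.Dict.contains_eq_isSome_get?, h'] at hconF
        have hgetD : usage.getD u 0 = 0 := by
          rw [PySem.Dict.getD_eq_get?_getD, pv_get?_map alloc usage h2 u, hgetA]; rfl
        have hIk : (alloc.insert u [g]).keys.Nodup :=
          PySem.Dict.nodup_keys_insert alloc u [g] h1
        have hIe : (usage.insert u (usage.getD u 0 + 1)).items =
            (alloc.insert u [g]).items.map pvF := by
          rw [PySem.Dict.items_insert_of_not_contains usage (usage.getD u 0 + 1) hconU,
            PySem.Dict.items_insert_of_not_contains alloc [g] hconF,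
            h2, List.map_append, hgetD]
          rfl
        have hIs : ∀ u' : String, u' ∈ PySem.Set.add seen u ↔
            ∃ gs', (alloc.insert u [g]).get? u' = some gs' ∧ g ∈ gs' := by
          intro u'
          rw [PySem.Set.mem_add, PySem.Dict.get?_insert]
          by_cases hu' : u' = u
          · subst hu'
            rw [if_pos rfl]
            constructor
            · intro _; exact ⟨[g], rfl, by simp⟩
            · intro _; simp
          · rw [if_neg hu']
            constructor
            · intro h'
              rcases h' with h' | h'
              · exact (h3 u').1 h'
              · exact absurd h' hu'
            · intro h'; exact Or.inl ((h3 u').2 h')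
        rw [hA, hB]
        obtain ⟨n1, n2, n3, n4⟩ :=
          ih (alloc.insert u [g]) (PySem.Set.add seen u)
            (usage.insert u (usage.getD u 0 + 1)) hIk hIe hIs
        refine ⟨n1, n2, n3, ?_⟩
        intro p' hp' x hx
        rcases n4 p' hp' x hx with ⟨p, hpmem, hxp⟩ | hxg
        · rcases (PySem.Dict.mem_items_insert alloc u [g] p).1 hpmem with rfl | ⟨hpold, _⟩
          · exact Or.inr (List.mem_singleton.1 hxp)
          · exact Or.inl ⟨p, hpold, hxp⟩
        · exact Or.inr hxg

-- Outer loops: with the remaining gpu keys distinct and absent from alloc's value lists,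
-- the two outer folds stay related by pvF.
theorem pv_outer (l : List (String × List String)) :
    ∀ (alloc : PySem.Dict String (List String)) (usage : PySem.Dict String Int),
      alloc.keys.Nodup →
      usage.items = alloc.items.map pvF →
      (l.map Prod.fst).Nodup →
      (∀ p ∈ alloc.items, ∀ x ∈ p.2, x ∉ l.map Prod.fst) →
      (l.foldl (fun usage p => (p.2.foldl pvCountStep ((PySem.Set.empty : PySem.Set String), usage)).2) usage).items
        = (l.foldl (fun alloc p => if 0 < p.2.length then p.2.foldl (pvAllocStep p.1) alloc else alloc) alloc).items.map pvF ∧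
      (l.foldl (fun alloc p => if 0 < p.2.length then p.2.foldl (pvAllocStep p.1) alloc else alloc) alloc).keys.Nodup := by
  induction l with
  | nil =>
    intro alloc usage h1 h2 _ _
    exact ⟨h2, h1⟩
  | cons hd rest ih =>
    obtain ⟨g, us⟩ := hd
    intro alloc usage h1 h2 h3 h4
    simp only [List.foldl_cons]
    have hguard : (if 0 < us.length then us.foldl (pvAllocStep g) alloc else alloc)
        = us.foldl (pvAllocStep g) alloc := by
      cases us <;> simp
    rw [hguard]
    simp only [List.map_cons, List.nodup_cons] at h3
    have hseed : ∀ u : String, u ∈ (PySem.Set.empty : PySem.Set String) ↔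
        ∃ gs, alloc.get? u = some gs ∧ g ∈ gs := by
      intro u
      constructor
      · intro h'; cases h'
      · rintro ⟨gs, hget, hg⟩
        have hmem : (u, gs) ∈ alloc.items :=
          (PySem.Dict.get?_eq_some_iff_mem_items alloc u gs h1).1 hget
        exact absurd (List.mem_cons_self) (h4 (u, gs) hmem g hg)
    obtain ⟨n1, n2, n3, n4⟩ := pv_inner g us alloc PySem.Set.empty usage h1 h2 hseed
    apply ih (us.foldl (pvAllocStep g) alloc) _ n1 n2 h3.2
    intro p' hp' x hx hxrest
    rcases n4 p' hp' x hx with ⟨p, hpmem, hxp⟩ | rfl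
    · exact h4 p hpmem x hxp (List.mem_cons_of_mem g hxrest)
    · exact h3.1 hxrest

-- ===== VERDICT (by name: the statement is the Claim_ definition above) =====
theorem convert_to_user_usage_spec : Claim_equal_convert_to_user_usage := by
  intro l _ hpre
  unfold Spec_convert_to_user_usage convert_to_user_usage convert_to_user_usage_alt
  obtain ⟨heq, hnodup⟩ := pv_outer l PySem.Dict.empty PySem.Dict.empty
    PySem.Dict.nodup_keys_empty rfl hpre (fun p hp => by cases hp)
  rw [PySem.Dict.items_foldl_insert_fresh _ Prod.fst
    (fun p => ((PySem.Set.ofList p.2).length : Int)) PySem.Dict.empty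
    (fun a _ => rfl) hnodup]
  exact heq.symm
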